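-- pv_equiv track=rewrite | github.com/jromie0924/plane-tracker-rgb-pi | scripts/scale_bdf_font.py | scale_bitmap
-- ===== SOURCE A (Python) =====
-- def scale_bitmap(hex_rows, scale_factor):
--     """
--     Scale bitmap data by replicating each pixel scale_factor times.
--     hex_rows: list of hex strings representing bitmap rows
--     scale_factor: how many times to enlarge (e.g., 3 for 3x)
--     """
--     scaled_rows = []
--
--     for hex_row in hex_rows:
--         # Handle multiple bytes per row (for wider fonts)
--         hex_bytes = [hex_row[i:i+2] for i in range(0, len(hex_row), 2)]
--
--         # Convert to binary and expand horizontally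
--         binary = ''
--         for hex_byte in hex_bytes:
--             byte_val = int(hex_byte, 16)
--             binary += format(byte_val, '08b')
--
--         # Expand each bit horizontally
--         expanded = ''
--         for bit in binary:
--             expanded += bit * scale_factor
--
--         # Convert back to hex
--         hex_bytes = []
--         for i in range(0, len(expanded), 8):
--             byte_str = expanded[i:i+8]
--             if len(byte_str) < 8:
--                 byte_str = byte_str.ljust(8, '0')
--             hex_bytes.append(format(int(byte_str, 2), '02x'))
--
--         # Add this row multiple times (vertical scaling)
--         for _ in range(scale_factor):
--             scaled_rows.append(''.join(hex_bytes))
--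
--     return scaled_rows
-- ===== SOURCE B (Python) =====
-- def scale_bitmap(hex_rows, scale_factor):
--     """Numeric reimplementation: accumulate each row's bytes into one integer,
--     expand its bits arithmetically (no intermediate bit strings), and emit the
--     whole row with a single fixed-width hex format."""
--     if scale_factor <= 0:
--         return []
--     mask = (1 << scale_factor) - 1
--     scaled = []
--     for row in hex_rows:
--         val = 0
--         for i in range(0, len(row), 2):
--             val = (val << 8) | int(row[i:i+2], 16)
--         nbits = 8 * ((len(row) + 1) // 2)
--         e = 0
--         for i in range(nbits - 1, -1, -1):
--             e = (e << scale_factor) | (mask if (val >> i) & 1 else 0)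
--         out = format(e, '0{}x'.format(nbits * scale_factor // 4)) if row else ''
--         scaled += [out] * scale_factor
--     return scaled
-- ===== Notes on version B (the rewrite author's own statement) =====
-- stated objective: alternative
-- what changed: B works on integers instead of strings: it accumulates each row's bytes into one big integer, expands the bits with an arithmetic shift/or loop (no intermediate binary string), and produces the row with a single fixed-width int-to-hex format instead of A's chunk-into-8-bit-substrings-and-re-hex-each repack loop.
-- outside the precondition, e.g. on scale_bitmap(['f '], 1): A returns ['0f'], B returns ['0f']
import Mathlib
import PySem

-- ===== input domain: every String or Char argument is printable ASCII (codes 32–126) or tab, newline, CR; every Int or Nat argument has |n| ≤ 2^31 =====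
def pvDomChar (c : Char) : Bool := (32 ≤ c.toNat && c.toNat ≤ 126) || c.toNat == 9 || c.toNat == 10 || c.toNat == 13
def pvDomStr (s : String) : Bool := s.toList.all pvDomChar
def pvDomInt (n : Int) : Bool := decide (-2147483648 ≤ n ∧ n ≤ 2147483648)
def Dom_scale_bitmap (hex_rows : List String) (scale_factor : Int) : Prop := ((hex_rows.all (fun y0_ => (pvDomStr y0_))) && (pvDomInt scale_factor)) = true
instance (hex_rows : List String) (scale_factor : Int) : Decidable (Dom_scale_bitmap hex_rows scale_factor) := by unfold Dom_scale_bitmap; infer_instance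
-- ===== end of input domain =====

-- B replaces A's string pipeline (per-byte binary strings, per-bit string replication,
-- chunk-by-8-and-re-hex repack) by integer arithmetic: one accumulated row value, an
-- arithmetic bit-expansion loop, and one fixed-width int-to-hex conversion
-- (objective: alternative decomposition, same cost).

-- ===== PORT A =====

-- value of one hex digit; int(·,16)'s digit reading, exact on [0-9a-fA-F] (Pre_ admits only those;
-- on other chars Python's int(chunk,16) raises ValueError or applies lenient whitespace/sign
-- parsing — both outside Pre_scale_bitmap)
def pvHexVal (c : Char) : Nat :=
  if '0' ≤ c ∧ c ≤ '9' then c.toNat - '0'.toNat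
  else if 'a' ≤ c ∧ c ≤ 'f' then c.toNat - 'a'.toNat + 10
  else if 'A' ≤ c ∧ c ≤ 'F' then c.toNat - 'A'.toNat + 10
  else 0

-- int(chunk, 16): exact on nonempty all-hex-digit chunks (guaranteed inside Pre_scale_bitmap)
def pvParseHex (l : List Char) : Nat := l.foldl (fun a c => 16 * a + pvHexVal c) 0

-- int(s, 2): exact on nonempty all-'0'/'1' strings (the only strings A feeds it inside Pre_)
def pvBits2 (l : List Char) : Nat := l.foldl (fun a c => 2 * a + (if c = '1' then 1 else 0)) 0

-- format(v, '08b') for w = 8: fixed-width binary, exact for 0 ≤ v < 2^w (chunk values are < 256)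
def pvBinFix : Nat → Nat → List Char
  | 0, _ => []
  | w + 1, v => pvBinFix w (v / 2) ++ [if v % 2 = 1 then '1' else '0']

-- format(v, '0{w}x'): fixed-width lowercase hex, exact for 0 ≤ v < 16^w
-- (A uses w = 2 with v < 256; B uses w = nbits*s/4 with v < 2^(nbits*s) = 16^w)
def pvHexFix : Nat → Nat → List Char
  | 0, _ => []
  | w + 1, v => pvHexFix w (v / 16) ++ [Nat.digitChar (v % 16)]

-- [hex_row[i:i+2] for i in range(0, len(hex_row), 2)] as the obvious structural recursion
def pvPairs2 (l : List Char) : List (List Char) :=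
  match l with
  | [] => []
  | c :: rest => (c :: rest.take 1) :: pvPairs2 (rest.drop 1)
  termination_by l.length
  decreasing_by simp

-- A's repack loop: for i in range(0, len(expanded), 8): byte_str = expanded[i:i+8]; ljust; format '02x'
def pvPack8 (l : List Char) : List (List Char) :=
  match l with
  | [] => []
  | c :: rest =>
    let byteStr := (c :: rest).take 8
    let byteStr := if byteStr.length < 8 then byteStr ++ List.replicate (8 - byteStr.length) '0' else byteStr
    pvHexFix 2 (pvBits2 byteStr) :: pvPack8 ((c :: rest).drop 8)
  termination_by l.length
  decreasing_by simp

def scale_bitmap (hex_rows : List String) (scale_factor : Int) : List String :=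
  hex_rows.foldl (fun scaled_rows hex_row =>
    let hex_bytes := pvPairs2 hex_row.toList
    -- binary += format(byte_val, '08b')
    let binary := hex_bytes.foldl (fun b hb => b ++ pvBinFix 8 (pvParseHex hb)) []
    -- expanded += bit * scale_factor  (str * negative = '', hence .toNat)
    let expanded := binary.foldl (fun e bit => e ++ List.replicate scale_factor.toNat bit) []
    let hexBytes := pvPack8 expanded
    -- for _ in range(scale_factor): scaled_rows.append(''.join(hex_bytes))
    scaled_rows ++ List.replicate scale_factor.toNat (String.ofList hexBytes.flatten)) []

-- ===== PORT B =====

-- B's first loop: for i in range(0,len(row),2): val = (val << 8) | int(row[i:i+2],16)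
-- ('|' of the shifted accumulator with a chunk value < 256 is '+'; pvParseHex of a ≤2-char
-- chunk is always < 256, so '*256 +' is exact here)
def pvParseRow (acc : Nat) (l : List Char) : Nat :=
  match l with
  | [] => acc
  | c :: rest => pvParseRow (acc * 256 + pvParseHex (c :: rest.take 1)) (rest.drop 1)
  termination_by l.length
  decreasing_by simp

-- B's second loop: for i in range(nbits-1,-1,-1): e = (e << s) | (mask if (val >> i) & 1 else 0)
-- ('|' with mask = 2^s - 1 < 2^s after shifting by s is '+'; the second argument counts the
-- remaining iterations, so the bit index used is n when stepping from n+1)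
def pvExpandLoop (s mask val : Nat) : Nat → Nat → Nat
  | e, 0 => e
  | e, n + 1 => pvExpandLoop s mask val (e * 2 ^ s + (if (val >>> n) % 2 = 1 then mask else 0)) n

def scale_bitmap_alt (hex_rows : List String) (scale_factor : Int) : List String :=
  if scale_factor ≤ 0 then []
  else
    let s := scale_factor.toNat
    let mask := 2 ^ s - 1
    hex_rows.foldl (fun scaled row =>
      let val := pvParseRow 0 row.toList
      let nbits := 8 * ((row.toList.length + 1) / 2)
      let e := pvExpandLoop s mask val 0 nbits
      let out := if row.toList.isEmpty then [] else pvHexFix (nbits * s / 4) e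
      scaled ++ List.replicate s (String.ofList out)) []

-- ===== PRECONDITION & SPEC =====
-- Pre_ excludes rows containing any non-hex-digit character: on those Python's int(chunk, 16)
-- normally raises ValueError; on the few such rows where int()'s lenient parsing (whitespace or a
-- sign inside a 2-char chunk) still returns a value, both A and B run the very same per-chunk
-- int() call and return the same accidental result (e.g. ['f '] → ['0f'] for both).
def pvIsHexDigit (c : Char) : Bool :=
  ('0' ≤ c && c ≤ '9') || ('a' ≤ c && c ≤ 'f') || ('A' ≤ c && c ≤ 'F')

def Pre_scale_bitmap (hex_rows : List String) (scale_factor : Int) : Prop :=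
  hex_rows.all (fun r => r.toList.all pvIsHexDigit) = true

instance (hex_rows : List String) (scale_factor : Int) : Decidable (Pre_scale_bitmap hex_rows scale_factor) := by
  unfold Pre_scale_bitmap; infer_instance

def pvWitness_scale_bitmap : List String × Int := (["3c", "7e"], 2)

def Spec_scale_bitmap (hex_rows : List String) (scale_factor : Int) (out : List String) : Prop := out = scale_bitmap_alt hex_rows scale_factor
instance (hex_rows : List String) (scale_factor : Int) (out : List String) : Decidable (Spec_scale_bitmap hex_rows scale_factor out) := by unfold Spec_scale_bitmap; infer_instance

-- ===== CLAIM (what is proved, stated in full; the proofs are below) =====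
def Claim_equal_scale_bitmap : Prop := ∀ (hex_rows : List String) (scale_factor : Int), Dom_scale_bitmap hex_rows scale_factor → Pre_scale_bitmap hex_rows scale_factor → Spec_scale_bitmap hex_rows scale_factor (scale_bitmap hex_rows scale_factor)

-- ===== LEMMAS AND PROOFS =====

theorem pvBits2_foldl_shift (l : List Char) (a : Nat) :
    l.foldl (fun a c => 2 * a + (if c = '1' then 1 else 0)) a
      = a * 2 ^ l.length + pvBits2 l := by
  induction l generalizing a with
  | nil => simp [pvBits2]
  | cons c t ih =>
    simp only [List.foldl_cons, pvBits2, List.length_cons]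
    rw [ih, ih (2 * 0 + _)]
    simp only [pvBits2]
    ring

theorem pvBits2_append (a b : List Char) :
    pvBits2 (a ++ b) = pvBits2 a * 2 ^ b.length + pvBits2 b := by
  simp only [pvBits2, List.foldl_append]
  rw [pvBits2_foldl_shift]
  rfl

theorem pvBits2_lt (l : List Char) : pvBits2 l < 2 ^ l.length := by
  induction l with
  | nil => simp [pvBits2]
  | cons c t ih =>
    have h1 : pvBits2 (c :: t)
        = (2 * 0 + (if c = '1' then 1 else 0)) * 2 ^ t.length + pvBits2 t := by
      simp only [pvBits2, List.foldl_cons]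
      rw [pvBits2_foldl_shift]
      rfl
    rw [h1]
    have hb : (if c = '1' then 1 else 0) ≤ 1 := by split <;> omega
    have h2 : 2 ^ (c :: t).length = 2 ^ t.length + 2 ^ t.length := by
      simp [List.length_cons, pow_succ]; ring
    rw [h2]
    nlinarith [pow_pos (by norm_num : (0:Nat) < 2) t.length]

theorem pvHexFix_split (b a x y : Nat) (hy : y < 16 ^ b) :
    pvHexFix (a + b) (x * 16 ^ b + y) = pvHexFix a x ++ pvHexFix b y := by
  induction b generalizing y with
  | zero =>
    interval_cases y
    simp [pvHexFix]
  | succ b ih =>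
    have h1 : (x * 16 ^ (b + 1) + y) % 16 = y % 16 := by
      have : x * 16 ^ (b + 1) = (x * 16 ^ b) * 16 := by ring
      omega
    have h2 : (x * 16 ^ (b + 1) + y) / 16 = x * 16 ^ b + y / 16 := by
      have : x * 16 ^ (b + 1) = (x * 16 ^ b) * 16 := by ring
      omega
    have h3 : y / 16 < 16 ^ b := by
      have : 16 ^ (b + 1) = 16 ^ b * 16 := by ring
      omega
    show pvHexFix ((a + b) + 1) _ = _
    simp only [pvHexFix]
    rw [h1, h2, ih _ h3]
    simp

theorem pvBinFix_length (w v : Nat) : (pvBinFix w v).length = w := by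
  induction w generalizing v with
  | zero => simp [pvBinFix]
  | succ w ih => simp [pvBinFix, ih]

theorem pvPack8_nil : pvPack8 [] = [] := by
  rw [pvPack8.eq_def]

theorem pvPack8_cons (c : Char) (rest : List Char) :
    pvPack8 (c :: rest)
      = pvHexFix 2 (pvBits2
          (if ((c :: rest).take 8).length < 8
           then (c :: rest).take 8 ++ List.replicate (8 - ((c :: rest).take 8).length) '0'
           else (c :: rest).take 8)) :: pvPack8 ((c :: rest).drop 8) := by
  rw [pvPack8.eq_def]

theorem pvPack8_flatten (n : Nat) (l : List Char) (hn : l.length ≤ n) (h : 8 ∣ l.length) :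
    (pvPack8 l).flatten = pvHexFix (l.length / 4) (pvBits2 l) := by
  induction n generalizing l with
  | zero =>
    have hnil : l = [] := by
      cases l with
      | nil => rfl
      | cons c t => simp at hn
    subst hnil
    simp [pvPack8_nil, pvHexFix]
  | succ n ih =>
    cases l with
    | nil => simp [pvPack8_nil, pvHexFix]
    | cons c t =>
      have hlen : 8 ≤ (c :: t).length := by
        rcases h with ⟨k, hk⟩
        have : k ≠ 0 := by rintro rfl; simp at hk
        omega
      have htake : ((c :: t).take 8).length = 8 := by
        rw [List.length_take]
        simp only [List.length_cons] at hlen ⊢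
        omega
      have hdlen : ((c :: t).drop 8).length = (c :: t).length - 8 := by simp
      have hdropdvd : 8 ∣ ((c :: t).drop 8).length := by
        rcases h with ⟨k, hk⟩
        exact ⟨k - 1, by omega⟩
      have hdle : ((c :: t).drop 8).length ≤ n := by
        rw [List.length_drop]
        simp only [List.length_cons] at hn ⊢
        omega
      rw [pvPack8_cons]
      simp only [htake, if_neg (by omega : ¬ (8 : Nat) < 8)]
      rw [List.flatten_cons, ih _ hdle hdropdvd]
      have hsplit : (c :: t) = (c :: t).take 8 ++ (c :: t).drop 8 := (List.take_append_drop 8 _).symm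
      have h4 : 4 ∣ ((c :: t).drop 8).length := dvd_trans (by norm_num) hdropdvd
      have hbits : pvBits2 (c :: t)
          = pvBits2 ((c :: t).take 8) * 2 ^ ((c :: t).drop 8).length + pvBits2 ((c :: t).drop 8) := by
        conv_lhs => rw [hsplit]
        rw [pvBits2_append]
      have hpow : (2 : Nat) ^ ((c :: t).drop 8).length = 16 ^ (((c :: t).drop 8).length / 4) := by
        rcases h4 with ⟨m, hm⟩
        rw [hm, show 4 * m / 4 = m by omega, show (16 : Nat) = 2 ^ 4 from rfl, ← pow_mul]
      have hylt : pvBits2 ((c :: t).drop 8) < 16 ^ (((c :: t).drop 8).length / 4) := by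
        rw [← hpow]; exact pvBits2_lt _
      have hwidth : (c :: t).length / 4 = 2 + ((c :: t).drop 8).length / 4 := by
        rcases hdropdvd with ⟨k, hk⟩
        omega
      rw [hbits, hwidth, hpow, pvHexFix_split _ 2 _ _ hylt]

-- ===== B-side lemmas =====

theorem pvCharLe_toNat {a b : Char} (h : a ≤ b) : a.toNat ≤ b.toNat := h

theorem pvHexVal_lt (c : Char) : pvHexVal c < 16 := by
  unfold pvHexVal
  split_ifs with h1 h2 h3
  · have h := pvCharLe_toNat h1.2
    have e9 : ('9' : Char).toNat = 57 := by decide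
    have e0 : ('0' : Char).toNat = 48 := by decide
    rw [e9] at h; rw [e0]; omega
  · have h := pvCharLe_toNat h2.2
    have ef : ('f' : Char).toNat = 102 := by decide
    have ea : ('a' : Char).toNat = 97 := by decide
    rw [ef] at h; rw [ea]; omega
  · have h := pvCharLe_toNat h3.2
    have eF : ('F' : Char).toNat = 70 := by decide
    have eA : ('A' : Char).toNat = 65 := by decide
    rw [eF] at h; rw [eA]; omega
  · omega

theorem pvParseHex_foldl_shift (l : List Char) (a : Nat) :
    l.foldl (fun a c => 16 * a + pvHexVal c) a = a * 16 ^ l.length + pvParseHex l := by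
  induction l generalizing a with
  | nil => simp [pvParseHex]
  | cons c t ih =>
    simp only [List.foldl_cons, pvParseHex, List.length_cons]
    rw [ih, ih (16 * 0 + _)]
    simp only [pvParseHex]
    ring

theorem pvParseHex_lt (l : List Char) : pvParseHex l < 16 ^ l.length := by
  induction l with
  | nil => simp [pvParseHex]
  | cons c t ih =>
    have h1 : pvParseHex (c :: t) = (16 * 0 + pvHexVal c) * 16 ^ t.length + pvParseHex t := by
      simp only [pvParseHex, List.foldl_cons]
      rw [pvParseHex_foldl_shift]
      rfl
    rw [h1, List.length_cons, pow_succ]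
    have := pvHexVal_lt c
    nlinarith [pow_pos (by norm_num : (0:Nat) < 16) t.length]

-- value of one hex digit seen as an 8-bit byte is its pvBinFix image
theorem pvBits2_binFix (w v : Nat) (hv : v < 2 ^ w) : pvBits2 (pvBinFix w v) = v := by
  induction w generalizing v with
  | zero => interval_cases v; simp [pvBinFix, pvBits2]
  | succ w ih =>
    have hdiv : v / 2 < 2 ^ w := by
      rw [pow_succ] at hv; omega
    simp only [pvBinFix]
    rw [pvBits2_append, ih _ hdiv]
    have hone : pvBits2 [if v % 2 = 1 then '1' else '0'] = v % 2 := by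
      split_ifs with h
      · rw [h]; decide
      · have h0 : pvBits2 ['0'] = 0 := by decide
        rw [h0]; omega
    rw [hone]
    have hlen1 : ([if v % 2 = 1 then '1' else '0'] : List Char).length = 1 := by
      split_ifs <;> rfl
    rw [hlen1, pow_one]
    omega

-- the bit string A builds from a row (per-chunk 8-bit pieces, concatenated)
def pvBitsOf (l : List Char) : List Char :=
  ((pvPairs2 l).map (fun hb => pvBinFix 8 (pvParseHex hb))).flatten

theorem pvPairs2_nil : pvPairs2 [] = [] := by rw [pvPairs2.eq_def]

theorem pvPairs2_cons (c : Char) (rest : List Char) :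
    pvPairs2 (c :: rest) = (c :: rest.take 1) :: pvPairs2 (rest.drop 1) := by
  rw [pvPairs2.eq_def]

theorem pvParseRow_nil (acc : Nat) : pvParseRow acc [] = acc := by rw [pvParseRow.eq_def]

theorem pvParseRow_cons (acc : Nat) (c : Char) (rest : List Char) :
    pvParseRow acc (c :: rest)
      = pvParseRow (acc * 256 + pvParseHex (c :: rest.take 1)) (rest.drop 1) := by
  rw [pvParseRow.eq_def]

theorem pvChunk_lt (c : Char) (rest : List Char) :
    pvParseHex (c :: rest.take 1) < 256 := by
  have h := pvParseHex_lt (c :: rest.take 1)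
  have hlen : (c :: rest.take 1).length ≤ 2 := by
    simp only [List.length_cons, List.length_take]
    omega
  have : (16 : Nat) ^ (c :: rest.take 1).length ≤ 16 ^ 2 :=
    Nat.pow_le_pow_right (by norm_num) hlen
  omega

theorem pvBitsOf_length (n : Nat) (l : List Char) (hn : l.length ≤ n) :
    (pvBitsOf l).length = 8 * ((l.length + 1) / 2) := by
  induction n generalizing l with
  | zero =>
    have : l = [] := by cases l with | nil => rfl | cons c t => simp at hn
    subst this
    simp [pvBitsOf, pvPairs2_nil]
  | succ n ih =>
    cases l with
    | nil => simp [pvBitsOf, pvPairs2_nil]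
    | cons c rest =>
      have hle : (rest.drop 1).length ≤ n := by
        rw [List.length_drop]; simp only [List.length_cons] at hn; omega
      have := ih (rest.drop 1) hle
      simp only [pvBitsOf, pvPairs2_cons, List.map_cons, List.flatten_cons,
        List.length_append, pvBinFix_length] at *
      rw [this]
      simp only [List.length_drop, List.length_cons]
      omega

theorem pvBits2_bitsOf (n : Nat) (l : List Char) (hn : l.length ≤ n) (acc : Nat) :
    pvParseRow acc l = acc * 2 ^ (pvBitsOf l).length + pvBits2 (pvBitsOf l) := by
  induction n generalizing l acc with
  | zero =>
    have : l = [] := by cases l with | nil => rfl | cons c t => simp at hn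
    subst this
    simp [pvParseRow_nil, pvBitsOf, pvPairs2_nil, pvBits2]
  | succ n ih =>
    cases l with
    | nil => simp [pvParseRow_nil, pvBitsOf, pvPairs2_nil, pvBits2]
    | cons c rest =>
      have hle : (rest.drop 1).length ≤ n := by
        rw [List.length_drop]; simp only [List.length_cons] at hn; omega
      have hbo : pvBitsOf (c :: rest)
          = pvBinFix 8 (pvParseHex (c :: rest.take 1)) ++ pvBitsOf (rest.drop 1) := by
        simp [pvBitsOf, pvPairs2_cons]
      have hchunk := pvChunk_lt c rest
      rw [pvParseRow_cons, ih _ hle, hbo, pvBits2_append,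
        pvBits2_binFix 8 _ (by norm_num at hchunk ⊢; omega)]
      simp only [List.length_append, pvBinFix_length]
      rw [pow_add]
      ring

-- the expansion loop only looks at the low n bits of val
theorem pvExpandLoop_congr (s mask : Nat) (v1 v2 : Nat) (n : Nat) (e : Nat)
    (h : ∀ i < n, (v1 >>> i) % 2 = (v2 >>> i) % 2) :
    pvExpandLoop s mask v1 e n = pvExpandLoop s mask v2 e n := by
  induction n generalizing e with
  | zero => rfl
  | succ n ih =>
    simp only [pvExpandLoop]
    rw [h n (by omega)]
    exact ih _ (fun i hi => h i (by omega))

theorem pvBits2_replicate (s : Nat) (c : Char) :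
    pvBits2 (List.replicate s c) = (if c = '1' then 1 else 0) * (2 ^ s - 1) := by
  induction s with
  | zero => simp [pvBits2]
  | succ m ihm =>
    rw [List.replicate_succ]
    have hstep : pvBits2 (c :: List.replicate m c)
        = (if c = '1' then 1 else 0) * 2 ^ m + pvBits2 (List.replicate m c) := by
      simp only [pvBits2, List.foldl_cons]
      rw [pvBits2_foldl_shift]
      simp [pvBits2, List.length_replicate]
    rw [hstep, ihm]
    have hp : 1 ≤ 2 ^ m := Nat.one_le_two_pow
    rw [pow_succ]
    split_ifs <;> omega

theorem pvExpandLoop_spec (s : Nat)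
    (bl : List Char) (e : Nat) :
    pvExpandLoop s (2 ^ s - 1) (pvBits2 bl) e bl.length
      = e * 2 ^ (s * bl.length) + pvBits2 ((bl.map (fun bit => List.replicate s bit)).flatten) := by
  induction bl generalizing e with
  | nil => simp [pvExpandLoop, pvBits2]
  | cons c t ih =>
    have hhead : pvBits2 (c :: t)
        = (if c = '1' then 1 else 0) * 2 ^ t.length + pvBits2 t := by
      simp only [pvBits2, List.foldl_cons]
      rw [pvBits2_foldl_shift]
      simp [pvBits2]
    set bitc : Nat := if c = '1' then 1 else 0 with hbitc
    have hbit1 : bitc ≤ 1 := by rw [hbitc]; split <;> omega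
    have hr : pvBits2 t < 2 ^ t.length := pvBits2_lt t
    -- top bit extraction
    have hshift : (pvBits2 (c :: t)) >>> t.length % 2 = bitc % 2 := by
      rw [Nat.shiftRight_eq_div_pow, hhead]
      have hdv : (bitc * 2 ^ t.length + pvBits2 t) / 2 ^ t.length = bitc := by
        rw [Nat.add_comm, Nat.add_mul_div_right _ _ (Nat.pow_pos (by norm_num)),
          Nat.div_eq_of_lt hr]
        omega
      rw [hdv]
    -- lower bits agree with those of pvBits2 t
    have hlow : ∀ i < t.length, (pvBits2 (c :: t)) >>> i % 2 = (pvBits2 t) >>> i % 2 := by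
      intro i hi
      rw [Nat.shiftRight_eq_div_pow, Nat.shiftRight_eq_div_pow, hhead]
      have h2 : (2 : Nat) ^ (t.length - i - 1) * 2 * 2 ^ i = 2 ^ t.length := by
        rw [← pow_succ, ← pow_add]
        congr 1
        omega
      have hsplit : bitc * 2 ^ t.length = bitc * 2 ^ (t.length - i - 1) * 2 * 2 ^ i := by
        rw [mul_assoc, mul_assoc, ← mul_assoc (2 ^ (t.length - i - 1)), h2]
      rw [hsplit, Nat.add_comm,
        Nat.add_mul_div_right _ _ (Nat.pow_pos (by norm_num) : (0:Nat) < 2 ^ i)]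
      omega
    show pvExpandLoop s (2 ^ s - 1) (pvBits2 (c :: t)) e (t.length + 1) = _
    simp only [pvExpandLoop]
    rw [hshift]
    have hifeq : (if bitc % 2 = 1 then (2 ^ s - 1) else 0) = bitc * (2 ^ s - 1) := by
      by_cases hc : c = '1' <;> simp [hbitc, hc]
    rw [hifeq, pvExpandLoop_congr s (2 ^ s - 1) _ (pvBits2 t) t.length _ hlow, ih]
    have hrep : pvBits2 (List.replicate s c) = bitc * (2 ^ s - 1) := by
      rw [pvBits2_replicate, hbitc]
    simp only [List.map_cons, List.flatten_cons]
    rw [pvBits2_append, hrep]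
    have hlenflat : ((t.map fun bit => List.replicate s bit).flatten).length = s * t.length := by
      rw [List.length_flatten, List.map_map]
      have hall : ∀ x ∈ t.map (List.length ∘ fun bit => List.replicate s bit), x = s := by
        intro x hx
        simp only [List.mem_map] at hx
        rcases hx with ⟨a, _, rfl⟩
        simp
      rw [List.sum_eq_card_nsmul _ s hall]
      simp [mul_comm]
    rw [hlenflat, List.length_cons, Nat.mul_succ, pow_add]
    ring

theorem pvExpLen (bl : List Char) (s : Nat) :
    ((bl.map (fun bit => List.replicate s bit)).flatten).length = s * bl.length := by
  induction bl with
  | nil => simp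
  | cons c t ih =>
    simp only [List.map_cons, List.flatten_cons, List.length_append,
      List.length_replicate, ih, List.length_cons]
    ring

theorem pvPack_expand (bl : List Char) (s : Nat) (h8 : 8 ∣ bl.length) :
    (pvPack8 ((bl.map (fun bit => List.replicate s bit)).flatten)).flatten
      = pvHexFix (bl.length * s / 4)
          (pvExpandLoop s (2 ^ s - 1) (pvBits2 bl) 0 bl.length) := by
  have hlen := pvExpLen bl s
  have hdvd : 8 ∣ ((bl.map (fun bit => List.replicate s bit)).flatten).length := by
    rw [hlen]; exact h8.mul_left s
  rw [pvPack8_flatten _ _ le_rfl hdvd, pvExpandLoop_spec s bl 0, hlen]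
  simp only [Nat.zero_mul, Nat.zero_add]
  congr 1
  rw [Nat.mul_comm]

-- per-row equality: A's string pipeline equals B's numeric pipeline
theorem pvRow_eq (l : List Char) (s : Nat) :
    (pvPack8 (List.foldl (fun e bit => e ++ List.replicate s bit) []
        (List.foldl (fun b hb => b ++ pvBinFix 8 (pvParseHex hb)) [] (pvPairs2 l)))).flatten
      = (if l.isEmpty then []
         else pvHexFix (8 * ((l.length + 1) / 2) * s / 4)
                (pvExpandLoop s (2 ^ s - 1) (pvParseRow 0 l) 0 (8 * ((l.length + 1) / 2)))) := by
  rw [PySem.List.foldl_append_eq_flatMap, List.nil_append,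
      PySem.List.foldl_append_eq_flatMap, List.nil_append,
      List.flatMap_def, List.flatMap_def]
  have hbllen : (pvBitsOf l).length = 8 * ((l.length + 1) / 2) :=
    pvBitsOf_length l.length l le_rfl
  have hch : (List.map (fun hb => pvBinFix 8 (pvParseHex hb)) (pvPairs2 l)).flatten
      = pvBitsOf l := rfl
  rw [hch, pvPack_expand (pvBitsOf l) s ⟨(l.length + 1) / 2, hbllen⟩]
  have hval : pvBits2 (pvBitsOf l) = pvParseRow 0 l := by
    rw [pvBits2_bitsOf l.length l le_rfl 0]
    simp
  cases l with
  | nil =>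
    have h0 : (pvBitsOf ([] : List Char)).length = 0 := by
      simp [pvBitsOf, pvPairs2_nil]
    rw [h0]
    simp [pvHexFix]
  | cons c rest =>
    rw [hbllen, hval]
    simp [List.isEmpty_cons]

theorem pvFoldl_nilrep (hex_rows : List String) (acc : List String) :
    hex_rows.foldl (fun scaled_rows (_ : String) =>
      scaled_rows ++ ([] : List String)) acc = acc := by
  induction hex_rows generalizing acc with
  | nil => rfl
  | cons h t ih => rw [List.foldl_cons, List.append_nil]; exact ih acc

-- ===== VERDICT (by name: the statement is the Claim_ definition above) =====
theorem scale_bitmap_spec : Claim_equal_scale_bitmap := by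
  intro hex_rows scale_factor _ _
  show scale_bitmap hex_rows scale_factor = scale_bitmap_alt hex_rows scale_factor
  unfold scale_bitmap scale_bitmap_alt
  by_cases hs : scale_factor ≤ 0
  · have h0 : scale_factor.toNat = 0 := Int.toNat_of_nonpos hs
    rw [if_pos hs]
    simp only [h0, List.replicate_zero]
    exact pvFoldl_nilrep hex_rows []
  · rw [if_neg hs]
    congr 1
    funext scaled row
    show scaled ++ List.replicate scale_factor.toNat (String.ofList
        (pvPack8 (List.foldl (fun e bit => e ++ List.replicate scale_factor.toNat bit) []
          (List.foldl (fun b hb => b ++ pvBinFix 8 (pvParseHex hb)) []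
            (pvPairs2 row.toList)))).flatten)
      = scaled ++ List.replicate scale_factor.toNat (String.ofList
          (if row.toList.isEmpty then []
           else pvHexFix (8 * ((row.toList.length + 1) / 2) * scale_factor.toNat / 4)
                  (pvExpandLoop scale_factor.toNat (2 ^ scale_factor.toNat - 1)
                    (pvParseRow 0 row.toList) 0 (8 * ((row.toList.length + 1) / 2)))))
    rw [pvRow_eq]
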